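-- pv_equiv track=rewrite | github.com/laniro/advent-of-code | 2025/day-7/solution.py | next_layer
-- ===== SOURCE A (Python) =====
-- def next_layer(grid, layer, beam_positions):
--     next_positions = []
--     splits = 0
--     for x in beam_positions:
--         if grid[layer][x] == '^':
--             next_positions.append(x-1)
--             next_positions.append(x+1)
--             splits += 1
--         else:
--             next_positions.append(x)
--     next_positions = list(set(next_positions))
--     if layer+1 == len(grid):
--         return splits
--     else:
--         return next_layer(grid, layer+1, next_positions) + splits
-- ===== SOURCE B (Python) =====
-- def next_layer(grid, layer, beam_positions):
--     # Iterative re-implementation: accumulator loop over layers instead of recursion.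
--     total = 0
--     cur = layer
--     positions = beam_positions
--     while True:
--         hits = [x for x in positions if grid[cur][x] == '^']
--         total += len(hits)
--         if cur + 1 == len(grid):
--             return total
--         cur += 1
--         hit_set = set(hits)
--         positions = list({x - 1 for x in hit_set}
--                          | {x + 1 for x in hit_set}
--                          | {x for x in positions if x not in hit_set})
-- ===== Notes on version B (the rewrite author's own statement) =====
-- stated objective: alternative
-- what changed: A's recursion over layers is replaced by an iterative while-loop threading (total, positions) accumulators, with the per-layer work done by a filter for the splitters and set comprehensions/union for the next positions instead of A's append-loop plus list(set()).
import Mathlib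
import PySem

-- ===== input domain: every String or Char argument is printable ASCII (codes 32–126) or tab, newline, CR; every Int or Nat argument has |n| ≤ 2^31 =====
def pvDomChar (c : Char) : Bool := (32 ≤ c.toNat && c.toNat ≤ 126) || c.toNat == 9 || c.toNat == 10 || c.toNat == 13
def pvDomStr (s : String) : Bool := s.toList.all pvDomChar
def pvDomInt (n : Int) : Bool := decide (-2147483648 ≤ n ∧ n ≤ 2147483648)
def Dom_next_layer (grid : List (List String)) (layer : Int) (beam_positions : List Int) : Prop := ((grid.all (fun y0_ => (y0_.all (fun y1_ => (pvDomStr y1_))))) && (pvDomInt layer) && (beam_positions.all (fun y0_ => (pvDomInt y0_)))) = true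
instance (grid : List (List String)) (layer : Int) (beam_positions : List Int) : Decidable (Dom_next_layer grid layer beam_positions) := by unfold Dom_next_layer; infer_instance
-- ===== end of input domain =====

-- B replaces A's recursion by an iterative accumulator loop over the layers (different decomposition; equal return value).

-- ===== PORT A =====
-- literal transliteration of A: one fold building (next_positions, splits), then dedupe with set(),
-- then either return splits at the last layer or recurse. The final 'else 0' branch only makes the
-- recursion total: Python reaches it solely when layer+1 > len(grid), where grid[layer] raises
-- IndexError, which Pre_next_layer excludes.
def next_layer (grid : List (List String)) (layer : Int) (beam_positions : List Int) : Int :=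
  let acc := beam_positions.foldl
    (fun (acc : List Int × Int) x =>
      if PySem.List.pyGet? ((PySem.List.pyGet? grid layer).getD []) x = some "^" then
        (acc.1 ++ [x - 1] ++ [x + 1], acc.2 + 1)
      else
        (acc.1 ++ [x], acc.2))
    ([], 0)
  let next_positions : PySem.Set Int := PySem.Set.ofList acc.1
  if layer + 1 = (grid.length : Int) then acc.2
  else if _h : layer + 1 < (grid.length : Int) then
    next_layer grid (layer + 1) next_positions + acc.2
  else 0
termination_by (grid.length - layer).toNat
decreasing_by omega

-- ===== PORT B =====
-- transliteration of B's while-loop as a tail recursion on (cur, positions, total); the final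
-- 'else total' branch only makes it total: Python reaches it solely when cur+1 > len(grid),
-- where grid[cur] raises IndexError, which Pre_next_layer excludes.
def next_layer_alt_go (grid : List (List String)) (cur : Int) (positions : List Int) (total : Int) : Int :=
  let hits := positions.filter
    (fun x => decide (PySem.List.pyGet? ((PySem.List.pyGet? grid cur).getD []) x = some "^"))
  let total := total + (hits.length : Int)
  if cur + 1 = (grid.length : Int) then total
  else if _h : cur + 1 < (grid.length : Int) then
    let hit_set : PySem.Set Int := PySem.Set.ofList hits
    next_layer_alt_go grid (cur + 1)
      (PySem.Set.union
        (PySem.Set.union (PySem.Set.ofList (hit_set.map (fun x => x - 1))) (hit_set.map (fun x => x + 1)))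
        (positions.filter (fun x => !(PySem.Set.contains hit_set x))))
      total
  else total
termination_by (grid.length - cur).toNat
decreasing_by omega

def next_layer_alt (grid : List (List String)) (layer : Int) (beam_positions : List Int) : Int :=
  next_layer_alt_go grid layer beam_positions 0

-- ===== PRECONDITION & SPEC =====
-- pvSpread/pvTrace only NAME the data Pre_ must talk about: pvTrace grid layer ps n is the set of
-- beam columns alive after the propagation has advanced n layers from layer (they carry no output of either program).
def pvSpread (row : List String) (ps : List Int) : List Int :=
  PySem.Set.ofList (ps.flatMap
    (fun x => if PySem.List.pyGet? row x = some "^" then [x - 1, x + 1] else [x]))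

def pvTrace (grid : List (List String)) (layer : Int) (ps : List Int) : Nat → List Int
  | 0 => ps
  | n + 1 => pvSpread ((PySem.List.pyGet? grid (layer + n)).getD []) (pvTrace grid layer ps n)

-- Pre_next_layer holds exactly on the inputs where the Python A returns: it excludes precisely the
-- inputs on which A raises — a layer index the grid cannot absorb (grid[layer] is only evaluated when
-- some beam exists, and layer ≥ len(grid) never reaches the stopping test layer+1 == len(grid)), or a
-- beam column which, propagated layer by layer, falls outside its (possibly negative-index-wrapped) row.
def Pre_next_layer (grid : List (List String)) (layer : Int) (beam_positions : List Int) : Prop :=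
  layer < (grid.length : Int) ∧
  (beam_positions = [] ∨ -(grid.length : Int) ≤ layer) ∧
  ∀ j ∈ PySem.List.pyRange layer (grid.length : Int) 1,
    ∀ x ∈ pvTrace grid layer beam_positions (j - layer).toNat,
      PySem.Raise.InRange (((PySem.List.pyGet? grid j).getD []).length) x
instance (grid : List (List String)) (layer : Int) (beam_positions : List Int) : Decidable (Pre_next_layer grid layer beam_positions) := by unfold Pre_next_layer; infer_instance

def pvWitness_next_layer : List (List String) × Int × List Int :=
  ([[".", "^", "."], [".", ".", "."]], 0, [1])

def Spec_next_layer (grid : List (List String)) (layer : Int) (beam_positions : List Int) (out : Int) : Prop := out = next_layer_alt grid layer beam_positions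
instance (grid : List (List String)) (layer : Int) (beam_positions : List Int) (out : Int) : Decidable (Spec_next_layer grid layer beam_positions out) := by unfold Spec_next_layer; infer_instance

-- ===== CLAIM (what is proved, stated in full; the proofs are below) =====
def Claim_equal_next_layer : Prop := ∀ (grid : List (List String)) (layer : Int) (beam_positions : List Int), Dom_next_layer grid layer beam_positions → Pre_next_layer grid layer beam_positions → Spec_next_layer grid layer beam_positions (next_layer grid layer beam_positions)

-- ===== LEMMAS AND PROOFS =====

-- A's single fold is a flatMap (next positions) plus a countP (splits).
theorem foldA_eq (c : Int → Prop) [DecidablePred c] (l : List Int) (acc : List Int) (n : Int) :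
    l.foldl
      (fun (a : List Int × Int) x =>
        if c x then (a.1 ++ [x - 1] ++ [x + 1], a.2 + 1) else (a.1 ++ [x], a.2))
      (acc, n)
    = (acc ++ l.flatMap (fun x => if c x then [x - 1, x + 1] else [x]),
       n + (l.countP (fun x => decide (c x)) : Int)) := by
  induction l generalizing acc n with
  | nil => simp
  | cons y ys ih =>
    simp only [List.foldl_cons]
    by_cases hy : c y
    · rw [if_pos hy, ih]
      simp only [List.flatMap_cons, if_pos hy, List.countP_cons, Prod.mk.injEq]
      refine ⟨by simp [List.append_assoc], by simp [hy]; ring⟩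
    · rw [if_neg hy, ih]
      simp only [List.flatMap_cons, if_neg hy, List.countP_cons, Prod.mk.injEq]
      refine ⟨by simp [List.append_assoc], by simp [hy]⟩

-- the two "next positions" sets have the same members, and both are Nodup, hence they are a Perm
theorem next_sets_perm (c : Int → Prop) [DecidablePred c] (PA PB : List Int) (h : PA.Perm PB) :
    (PySem.Set.ofList (PA.flatMap (fun x => if c x then [x - 1, x + 1] else [x]))).Perm
      (PySem.Set.union
        (PySem.Set.union
          (PySem.Set.ofList ((PySem.Set.ofList (PB.filter (fun x => decide (c x)))).map (fun x => x - 1)))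
          ((PySem.Set.ofList (PB.filter (fun x => decide (c x)))).map (fun x => x + 1)))
        (PB.filter (fun x => !(PySem.Set.contains (PySem.Set.ofList (PB.filter (fun x => decide (c x)))) x)))) := by
  have hmem := fun a => h.mem_iff (a := a)
  rw [List.perm_ext_iff_of_nodup (PySem.Set.nodup_ofList _)
      (PySem.Set.nodup_union _ _ (PySem.Set.nodup_union _ _ (PySem.Set.nodup_ofList _)))]
  intro a
  simp only [PySem.Set.mem_ofList, PySem.Set.mem_union, List.mem_flatMap, List.mem_map,
    List.mem_filter, decide_eq_true_eq, Bool.not_eq_true', Bool.eq_false_iff, ne_eq,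
    PySem.Set.contains_iff]
  constructor
  · rintro ⟨x, hx, hval⟩
    by_cases hc : c x
    · simp only [if_pos hc, List.mem_cons, List.not_mem_nil, or_false] at hval
      rcases hval with rfl | rfl
      · exact Or.inl (Or.inl ⟨x, ⟨(hmem x).1 hx, hc⟩, rfl⟩)
      · exact Or.inl (Or.inr ⟨x, ⟨(hmem x).1 hx, hc⟩, rfl⟩)
    · simp only [if_neg hc, List.mem_singleton] at hval
      subst hval
      exact Or.inr ⟨(hmem _).1 hx, fun hcon => hc hcon.2⟩
  · rintro ((⟨x, ⟨hxB, hcx⟩, rfl⟩ | ⟨x, ⟨hxB, hcx⟩, rfl⟩) | ⟨ha, hnot⟩)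
    · exact ⟨x, (hmem x).2 hxB, by simp [if_pos hcx]⟩
    · exact ⟨x, (hmem x).2 hxB, by simp [if_pos hcx]⟩
    · have hca : ¬ c a := fun hca => hnot ⟨ha, hca⟩
      exact ⟨a, (hmem a).2 ha, by simp [if_neg hca]⟩

-- loop ↔ recursion: the tail-recursive loop with accumulator t equals t + A's recursion,
-- whenever the two position lists are permutations of each other.
theorem go_eq_next_layer (grid : List (List String)) (j : Int) (PA PB : List Int) (t : Int)
    (h : PA.Perm PB) :
    next_layer_alt_go grid j PB t = t + next_layer grid j PA := by
  rw [next_layer_alt_go, next_layer]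
  simp only
  rw [foldA_eq]
  simp only [List.nil_append]
  have hcnt : (PB.countP (fun x =>
      decide (PySem.List.pyGet? ((PySem.List.pyGet? grid j).getD []) x = some "^")))
      = (PA.countP (fun x =>
      decide (PySem.List.pyGet? ((PySem.List.pyGet? grid j).getD []) x = some "^"))) :=
    (h.countP_eq _).symm
  have hlen : ((PB.filter (fun x =>
      decide (PySem.List.pyGet? ((PySem.List.pyGet? grid j).getD []) x = some "^"))).length)
      = (PA.countP (fun x =>
      decide (PySem.List.pyGet? ((PySem.List.pyGet? grid j).getD []) x = some "^"))) := by
    rw [← List.countP_eq_length_filter, hcnt]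
  split
  · rw [hlen]; ring
  · split
    · rw [go_eq_next_layer grid (j + 1) _ _ _
        (next_sets_perm (fun x => PySem.List.pyGet? ((PySem.List.pyGet? grid j).getD []) x = some "^") _ _ h)]
      rw [hlen]; ring
    · -- unreachable under Pre_: here j ≥ grid.length, the row is empty, so there are no hits
      rename_i h1 h2
      have hrow : PySem.List.pyGet? grid j = none := by
        rw [PySem.List.pyGet?_eq_none_iff]
        simp only [PySem.Raise.InRange]
        omega
      have hfil : (PB.filter (fun x =>
          decide (PySem.List.pyGet? ((PySem.List.pyGet? grid j).getD []) x = some "^"))) = [] := by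
        rw [hrow]
        simp [PySem.List.pyGet?]
      rw [hfil]
      simp
termination_by (grid.length - j).toNat
decreasing_by omega

-- ===== VERDICT (by name: the statement is the Claim_ definition above) =====
theorem next_layer_spec : Claim_equal_next_layer := by
  intro grid layer beam_positions _ _
  unfold Spec_next_layer next_layer_alt
  rw [go_eq_next_layer grid layer beam_positions beam_positions 0 (List.Perm.refl _)]
  ring
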